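-- pv_equiv track=rewrite | github.com/IBM/InspectorRAGet | converters/acebench/convert.py | shorten_names
-- ===== SOURCE A (Python) =====
-- def shorten_names(names: list[str]) -> dict[str, str]:
--     """
--     Strip the longest common prefix and suffix shared by all names and return
--     {original_name: display_name}. Falls back to full names if stripping would
--     produce an empty name for any entry.
--     """
--     if not names:
--         return {}
--     if len(names) == 1:
--         return {names[0]: names[0]}
--
--     prefix = 0
--     for chars in zip(*names):
--         if len(set(chars)) == 1:
--             prefix += 1
--         else:
--             break
--
--     rev = [n[::-1] for n in names]
--     suffix = 0
--     for chars in zip(*rev):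
--         if len(set(chars)) == 1:
--             suffix += 1
--         else:
--             break
--
--     result = {}
--     for n in names:
--         short = n[prefix: len(n) - suffix if suffix else None]
--         short = short.strip("_-")
--         result[n] = short
--
--     if any(not v for v in result.values()):
--         return {n: n for n in names}
--
--     return result
-- ===== SOURCE B (Python) =====
-- def shorten_names(names: list[str]) -> dict[str, str]:
--     if not names:
--         return {}
--     if len(names) == 1:
--         return {names[0]: names[0]}
--
--     def lcp(a: str, b: str) -> int:
--         k = 0
--         while k < len(a) and k < len(b) and a[k] == b[k]:
--             k += 1
--         return k
--
--     # common prefix of all = common prefix of the lexicographic extremes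
--     prefix = lcp(min(names), max(names))
--     rev = [n[::-1] for n in names]
--     suffix = lcp(min(rev), max(rev))
--
--     result = {n: n[prefix: len(n) - suffix if suffix else None].strip("_-") for n in names}
--     if any(not v for v in result.values()):
--         return {n: n for n in names}
--     return result
-- ===== Notes on version B (the rewrite author's own statement) =====
-- stated objective: alternative
-- what changed: Replaces A's two zip(*names) column scans (building each column and a set per column) by the min/max trick: the common prefix (resp. suffix, via reversed strings) of all names equals the common prefix of the two lexicographic extremes, computed by one character walk over min(names) and max(names).
import Mathlib
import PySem

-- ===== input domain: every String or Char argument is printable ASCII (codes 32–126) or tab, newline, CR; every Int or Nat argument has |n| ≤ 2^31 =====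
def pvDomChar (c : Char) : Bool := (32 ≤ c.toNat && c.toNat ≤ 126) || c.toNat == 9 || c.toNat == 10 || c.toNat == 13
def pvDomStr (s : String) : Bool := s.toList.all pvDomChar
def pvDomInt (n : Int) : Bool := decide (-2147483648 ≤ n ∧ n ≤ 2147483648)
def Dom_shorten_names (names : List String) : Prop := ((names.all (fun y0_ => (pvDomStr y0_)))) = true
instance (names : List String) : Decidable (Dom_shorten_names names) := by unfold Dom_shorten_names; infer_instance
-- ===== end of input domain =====

-- B replaces A's two zip(*names) column scans by the classic min/max trick: the common prefix
-- (resp. suffix) of all names is the common prefix of the two lexicographic extremes (objective: alternative).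

-- ===== PORT A =====
-- zip(*xss) truncates at the shortest row: its column count is the minimum row length
def pyMinRowLen : List (List Char) → Nat
  | [] => 0
  | [xs] => xs.length
  | xs :: rest => min xs.length (pyMinRowLen rest)

-- zip(*xss) as the list of columns (the default of getD is never read: j < every row length)
def pyZipStar (xss : List (List Char)) : List (List Char) :=
  (List.range (pyMinRowLen xss)).map (fun j => xss.map (fun xs => xs.getD j ' '))

def shorten_names (names : List String) : List (String × String) :=
  if names = [] then []
  else if names.length = 1 then [(names.headD "", names.headD "")]
  else
    -- for chars in zip(*names): prefix += 1 while len(set(chars)) == 1, else break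
    let prefixLen := ((pyZipStar (names.map String.toList)).takeWhile
        (fun col => (PySem.Set.ofList col).length == 1)).length
    let rev := names.map (fun n => n.toList.reverse)
    let suffixLen := ((pyZipStar rev).takeWhile
        (fun col => (PySem.Set.ofList col).length == 1)).length
    let result := names.foldl (fun d n =>
      d.insert n (String.ofList (PySem.Chars.stripChars
        (PySem.List.slice n.toList (some (prefixLen : Int))
          (if suffixLen = 0 then none else some ((n.toList.length : Int) - (suffixLen : Int))))
        ['_', '-']))) PySem.Dict.empty
    if result.values.any (fun v => v == "") then
      (names.foldl (fun d n => d.insert n n) PySem.Dict.empty).items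
    else result.items

-- ===== PORT B =====
-- while k < len(a) and k < len(b) and a[k] == b[k]: k += 1
def lcpLen : List Char → List Char → Nat
  | a :: as, b :: bs => if a = b then lcpLen as bs + 1 else 0
  | _, _ => 0

def shorten_names_alt (names : List String) : List (String × String) :=
  if names = [] then []
  else if names.length = 1 then [(names.headD "", names.headD "")]
  else
    let prefixLen := lcpLen ((PySem.List.min? names (fun x => x)).getD "").toList
                            ((PySem.List.max? names (fun x => x)).getD "").toList
    let rev := names.map (fun n => String.ofList n.toList.reverse)
    let suffixLen := lcpLen ((PySem.List.min? rev (fun x => x)).getD "").toList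
                            ((PySem.List.max? rev (fun x => x)).getD "").toList
    let result := names.foldl (fun d n =>
      d.insert n (String.ofList (PySem.Chars.stripChars
        (PySem.List.slice n.toList (some (prefixLen : Int))
          (if suffixLen = 0 then none else some ((n.toList.length : Int) - (suffixLen : Int))))
        ['_', '-']))) PySem.Dict.empty
    if result.values.any (fun v => v == "") then
      (names.foldl (fun d n => d.insert n n) PySem.Dict.empty).items
    else result.items

-- ===== PRECONDITION & SPEC =====
def Spec_shorten_names (names : List String) (out : List (String × String)) : Prop := out = shorten_names_alt names
instance (names : List String) (out : List (String × String)) : Decidable (Spec_shorten_names names out) := by unfold Spec_shorten_names; infer_instance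

-- ===== CLAIM (what is proved, stated in full; the proofs are below) =====
def Claim_equal_shorten_names : Prop := ∀ (names : List String), Dom_shorten_names names → Spec_shorten_names names (shorten_names names)

-- ===== LEMMAS AND PROOFS =====

lemma lcp_le_right : ∀ (a b : List Char), lcpLen a b ≤ b.length
  | [], _ => by simp [lcpLen]
  | _ :: _, [] => by simp [lcpLen]
  | a :: as, b :: bs => by
    by_cases h : a = b
    · subst h
      have := lcp_le_right as bs
      simp [lcpLen]
      omega
    · simp [lcpLen, h]

lemma take_lcp_eq : ∀ (a b : List Char), a.take (lcpLen a b) = b.take (lcpLen a b)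
  | [], b => by simp [lcpLen]
  | _ :: _, [] => by simp [lcpLen]
  | a :: as, b :: bs => by
    by_cases h : a = b
    · subst h
      simp [lcpLen, take_lcp_eq as bs]
    · simp [lcpLen, h]

lemma le_lcp : ∀ (a b : List Char) (k : Nat), k ≤ a.length → k ≤ b.length →
    a.take k = b.take k → k ≤ lcpLen a b
  | _, _, 0, _, _, _ => Nat.zero_le _
  | [], _, _ + 1, ha, _, _ => by simp at ha
  | _ :: _, [], _ + 1, _, hb, _ => by simp at hb
  | a :: as, b :: bs, k + 1, ha, hb, ht => by
    simp only [List.take_succ_cons, List.cons.injEq] at ht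
    obtain ⟨h1, h2⟩ := ht
    subst h1
    have := le_lcp as bs k (by simpa using ha) (by simpa using hb) h2
    simp [lcpLen]
    omega

lemma lcp_sandwich : ∀ (lo s hi : List Char), lo ≤ s → s ≤ hi → lcpLen lo hi ≤ lcpLen lo s
  | [], _, _, _, _ => by simp [lcpLen]
  | _ :: _, _, [], _, _ => by simp [lcpLen]
  | u :: lo', s, v :: hi', h1, h2 => by
    by_cases hcd : u = v
    · subst hcd
      cases s with
      | nil =>
        exact absurd h1 (not_le.mpr (List.nil_lt_cons u lo'))
      | cons e s' =>
        have hce : u = e := by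
          rcases lt_trichotomy u e with h | h | h
          · exact absurd (lt_of_le_of_lt h2 (List.cons_lt_cons_iff.mpr (Or.inl h))) (lt_irrefl _)
          · exact h
          · exact absurd (lt_of_le_of_lt h1 (List.cons_lt_cons_iff.mpr (Or.inl h))) (lt_irrefl _)
        subst hce
        have h1' : lo' ≤ s' := by
          have := not_lt.mpr h1
          rw [List.cons_lt_cons_iff] at this
          push_neg at this
          exact this.2 rfl
        have h2' : s' ≤ hi' := by
          have := not_lt.mpr h2
          rw [List.cons_lt_cons_iff] at this
          push_neg at this
          exact this.2 rfl
        have := lcp_sandwich lo' s' hi' h1' h2'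
        simp [lcpLen]
        omega
    · simp [lcpLen, hcd]

lemma str_le_iff (s t : String) : s ≤ t ↔ s.toList ≤ t.toList := by
  rw [← not_lt, ← not_lt, String.lt_iff_toList_lt]

lemma getD_eq (u : List Char) (j : Nat) (h : j < u.length) : u.getD j ' ' = u[j]'h := by
  simp [List.getD_eq_getElem?_getD, List.getElem?_eq_getElem h]

lemma set_len_one_iff {l : List Char} (hl : l ≠ []) :
    (((PySem.Set.ofList l).length == 1) = true) ↔ ∀ x ∈ l, ∀ y ∈ l, x = y := by
  rw [beq_iff_eq]
  constructor
  · intro h x hx y hy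
    obtain ⟨a, ha⟩ := List.length_eq_one_iff.mp h
    have hx' := (PySem.Set.mem_ofList l x).mpr hx
    have hy' := (PySem.Set.mem_ofList l y).mpr hy
    rw [ha] at hx' hy'
    simp at hx' hy'
    rw [hx', hy']
  · intro h
    obtain ⟨z, t, rfl⟩ := List.exists_cons_of_ne_nil hl
    have hz : z ∈ PySem.Set.ofList (z :: t) := (PySem.Set.mem_ofList _ _).mpr (by simp)
    have hnd := PySem.Set.nodup_ofList (z :: t)
    have hall : ∀ x ∈ PySem.Set.ofList (z :: t), x = z :=
      fun x hx => h x ((PySem.Set.mem_ofList _ _).mp hx) z (by simp)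
    cases hsd : PySem.Set.ofList (z :: t) with
    | nil => rw [hsd] at hz; simp at hz
    | cons a t2 =>
      cases t2 with
      | nil => simp
      | cons b t3 =>
        rw [hsd] at hall hnd
        have ha := hall a (by simp)
        have hb := hall b (by simp)
        subst ha; subst hb
        simp at hnd

lemma pyMinRowLen_le : ∀ (xss : List (List Char)) (u : List Char), u ∈ xss → pyMinRowLen xss ≤ u.length
  | [], u, h => by simp at h
  | [xs], u, h => by
    simp at h; subst h; simp [pyMinRowLen]
  | xs :: y :: t, u, h => by
    have hunf : pyMinRowLen (xs :: y :: t) = min xs.length (pyMinRowLen (y :: t)) := rfl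
    rcases List.mem_cons.mp h with h' | h'
    · subst h'; rw [hunf]; exact Nat.min_le_left _ _
    · rw [hunf]
      exact le_trans (Nat.min_le_right _ _) (pyMinRowLen_le (y :: t) u h')

lemma le_pyMinRowLen : ∀ (xss : List (List Char)) (k : Nat), xss ≠ [] →
    (∀ u ∈ xss, k ≤ u.length) → k ≤ pyMinRowLen xss
  | [], _, h, _ => by simp at h
  | [xs], k, _, hall => by
    simpa [pyMinRowLen] using hall xs (by simp)
  | xs :: y :: t, k, _, hall => by
    have hunf : pyMinRowLen (xs :: y :: t) = min xs.length (pyMinRowLen (y :: t)) := rfl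
    rw [hunf]
    exact le_min (hall xs (by simp))
      (le_pyMinRowLen (y :: t) k (by simp) (fun u hc => hall u (List.mem_cons_of_mem _ hc)))

lemma le_length_takeWhile {α : Type} : ∀ (l : List α) (p : α → Bool) (k : Nat),
    k ≤ l.length → (∀ j (hj : j < l.length), j < k → p (l[j]'hj) = true) →
    k ≤ (l.takeWhile p).length
  | _, _, 0, _, _ => Nat.zero_le _
  | [], _, _ + 1, hk, _ => by simp at hk
  | x :: t, p, k + 1, hk, h => by
    have px : p x = true := h 0 (by simp) (by omega)
    rw [List.takeWhile_cons, if_pos px]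
    simp only [List.length_cons]
    have := le_length_takeWhile t p k (by simpa using hk)
      (fun j hj hjk => by simpa using h (j + 1) (by simpa using hj) (by omega))
    omega

lemma tw_getElem (l : List (List Char)) (p : List Char → Bool) (j : Nat)
    (hj : j < (l.takeWhile p).length) :
    p (l[j]'(lt_of_lt_of_le hj (List.takeWhile_prefix p).length_le)) = true := by
  have h1 := List.mem_takeWhile_imp (List.getElem_mem hj)
  rwa [(List.takeWhile_prefix p).getElem hj] at h1

lemma colrun_eq_lcp (names : List String) (hne : names ≠ []) :
    ((pyZipStar (names.map String.toList)).takeWhile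
        (fun col => (PySem.Set.ofList col).length == 1)).length
    = lcpLen ((PySem.List.min? names (fun x => x)).getD "").toList
             ((PySem.List.max? names (fun x => x)).getD "").toList := by
  obtain ⟨lo, hlo⟩ : ∃ lo, PySem.List.min? names (fun x => x) = some lo := by
    cases h : PySem.List.min? names (fun x => x) with
    | none => exact absurd ((PySem.List.min?_eq_none_iff _ _).mp h) hne
    | some m => exact ⟨m, rfl⟩
  obtain ⟨hi, hhi⟩ : ∃ hi, PySem.List.max? names (fun x => x) = some hi := by
    cases h : PySem.List.max? names (fun x => x) with
    | none => exact absurd ((PySem.List.max?_eq_none_iff _ _).mp h) hne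
    | some m => exact ⟨m, rfl⟩
  rw [hlo, hhi]
  simp only [Option.getD_some]
  have hmin := PySem.List.min?_isMin hlo
  have hmax := PySem.List.max?_isMax hhi
  have hlomem' : lo.toList ∈ names.map String.toList :=
    List.mem_map.mpr ⟨lo, PySem.List.min?_mem hlo, rfl⟩
  have hhimem' : hi.toList ∈ names.map String.toList :=
    List.mem_map.mpr ⟨hi, PySem.List.max?_mem hhi, rfl⟩
  set K := lcpLen lo.toList hi.toList with hK
  set css := names.map String.toList with hcss
  have hc : ∀ u ∈ css, K ≤ u.length ∧ lo.toList.take K = u.take K := by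
    intro u hcm
    obtain ⟨s, hs, rfl⟩ := List.mem_map.mp hcm
    have h1 : lo.toList ≤ s.toList := (str_le_iff lo s).mp (hmin s hs)
    have h2 : s.toList ≤ hi.toList := (str_le_iff s hi).mp (hmax s hs)
    have hks : K ≤ lcpLen lo.toList s.toList := lcp_sandwich _ _ _ h1 h2
    refine ⟨le_trans hks (lcp_le_right _ _), ?_⟩
    calc lo.toList.take K = (lo.toList.take (lcpLen lo.toList s.toList)).take K := by
          rw [List.take_take, Nat.min_eq_left hks]
      _ = (s.toList.take (lcpLen lo.toList s.toList)).take K := by rw [take_lcp_eq]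
      _ = s.toList.take K := by rw [List.take_take, Nat.min_eq_left hks]
  have hcne : css ≠ [] := by
    rw [hcss]
    simp [hne]
  have hKm : K ≤ pyMinRowLen css := le_pyMinRowLen css K hcne (fun u h => (hc u h).1)
  have hzlen : (pyZipStar css).length = pyMinRowLen css := by simp [pyZipStar]
  have hloK : K ≤ lo.toList.length := (hc _ hlomem').1
  have hhiK : K ≤ hi.toList.length := (hc _ hhimem').1
  apply le_antisymm
  · by_contra hlt
    push_neg at hlt
    have hLle : ((pyZipStar css).takeWhile
        (fun col => (PySem.Set.ofList col).length == 1)).length ≤ (pyZipStar css).length :=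
      (List.takeWhile_prefix _).length_le
    have hK1m : K + 1 ≤ pyMinRowLen css := by rw [hzlen] at hLle; omega
    have hlolen : K + 1 ≤ lo.toList.length := le_trans hK1m (pyMinRowLen_le css _ hlomem')
    have hhilen : K + 1 ≤ hi.toList.length := le_trans hK1m (pyMinRowLen_le css _ hhimem')
    have htake : lo.toList.take (K + 1) = hi.toList.take (K + 1) := by
      apply List.ext_getElem
      · simp only [List.length_take]
        rw [Nat.min_eq_left (by simpa using hlolen), Nat.min_eq_left (by simpa using hhilen)]
      · intro i h1 h2
        have hiK : i < K + 1 := by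
          simp only [List.length_take, lt_min_iff] at h1
          exact h1.1
        rw [List.getElem_take, List.getElem_take]
        have hiL : i < ((pyZipStar css).takeWhile
            (fun col => (PySem.Set.ofList col).length == 1)).length := by omega
        have hp := tw_getElem (pyZipStar css) _ i hiL
        have hcoleq : (pyZipStar css)[i]'(lt_of_lt_of_le hiL
              (List.takeWhile_prefix (fun col => (PySem.Set.ofList col).length == 1)).length_le)
            = css.map (fun xs => xs.getD i ' ') := by
          simp [pyZipStar]
        rw [hcoleq] at hp
        have huna := (set_len_one_iff (by simp [hcne])).mp hp
        have e1 := huna _ (List.mem_map.mpr ⟨lo.toList, hlomem', rfl⟩)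
                        _ (List.mem_map.mpr ⟨hi.toList, hhimem', rfl⟩)
        rwa [getD_eq _ _ (by omega), getD_eq _ _ (by omega)] at e1
    have := le_lcp lo.toList hi.toList (K + 1) hlolen hhilen htake
    omega
  · apply le_length_takeWhile
    · rw [hzlen]; exact hKm
    · intro j hj hjK
      have hjm : j < pyMinRowLen css := by rwa [hzlen] at hj
      have hcoleq : (pyZipStar css)[j]'hj = css.map (fun xs => xs.getD j ' ') := by
        simp [pyZipStar]
      rw [hcoleq]
      refine (set_len_one_iff (by simp [hcne])).mpr ?_
      intro x hx y hy
      obtain ⟨u, hcm, rfl⟩ := List.mem_map.mp hx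
      obtain ⟨v, hdm, rfl⟩ := List.mem_map.mp hy
      have hjc : j < u.length := lt_of_lt_of_le hjK (hc u hcm).1
      have hjd : j < v.length := lt_of_lt_of_le hjK (hc v hdm).1
      have hjlo : j < lo.toList.length := lt_of_lt_of_le hjK hloK
      rw [getD_eq u j hjc, getD_eq v j hjd]
      have ec : u[j]'hjc = lo.toList[j]'hjlo := by
        have t1 := (hc u hcm).2
        calc u[j]'hjc = (u.take K)[j]'(by rw [List.length_take, lt_min_iff]; exact ⟨hjK, hjc⟩) :=
              (List.getElem_take).symm
          _ = (lo.toList.take K)[j]'(by rw [List.length_take, lt_min_iff]; exact ⟨hjK, hjlo⟩) := by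
              simp only [← t1]
          _ = lo.toList[j]'hjlo := List.getElem_take
      have ed : v[j]'hjd = lo.toList[j]'hjlo := by
        have t1 := (hc v hdm).2
        calc v[j]'hjd = (v.take K)[j]'(by rw [List.length_take, lt_min_iff]; exact ⟨hjK, hjd⟩) :=
              (List.getElem_take).symm
          _ = (lo.toList.take K)[j]'(by rw [List.length_take, lt_min_iff]; exact ⟨hjK, hjlo⟩) := by
              simp only [← t1]
          _ = lo.toList[j]'hjlo := List.getElem_take
      rw [ec, ed]

lemma colrun_eq_lcp_rev (names : List String) (hne : names ≠ []) :
    ((pyZipStar (names.map (fun n => n.toList.reverse))).takeWhile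
        (fun col => (PySem.Set.ofList col).length == 1)).length
    = lcpLen ((PySem.List.min? (names.map (fun n => String.ofList n.toList.reverse)) (fun x => x)).getD "").toList
             ((PySem.List.max? (names.map (fun n => String.ofList n.toList.reverse)) (fun x => x)).getD "").toList := by
  have h := colrun_eq_lcp (names.map (fun n => String.ofList n.toList.reverse)) (by simpa using hne)
  have hmap : (names.map (fun n => String.ofList n.toList.reverse)).map String.toList
      = names.map (fun n => n.toList.reverse) := by
    simp [List.map_map, Function.comp]
  rw [hmap] at h
  exact h

-- ===== VERDICT (by name: the statement is the Claim_ definition above) =====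
theorem shorten_names_spec : Claim_equal_shorten_names := by
  intro names _
  unfold Spec_shorten_names
  by_cases h0 : names = []
  · subst h0; rfl
  · by_cases h1 : names.length = 1
    · simp only [shorten_names, shorten_names_alt, if_neg h0, if_pos h1]
    · simp only [shorten_names, shorten_names_alt, if_neg h0, if_neg h1,
        colrun_eq_lcp names h0, colrun_eq_lcp_rev names h0]
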